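-- pv_equiv track=rewrite | github.com/sairambokka/TIP-102-1a | Week-3/arrange_attendees_by_priority.py | arrange_attendees_by_priority
-- ===== SOURCE A (Python) =====
-- def arrange_attendees_by_priority(attendees, priority):
--     less = []
--     greater = []
--     equal = []
--     i = 0
--     j = len(attendees) - 1
--     k = (i + j + 1) // 2
--
--     for n in attendees:
--         if n < priority:
--             less.append(n)
--         if n == priority:
--             equal.append(n)
--         if n > priority:
--             greater.append(n)
--
--     return (less + equal + greater)
-- ===== SOURCE B (Python) =====
-- def arrange_attendees_by_priority(attendees, priority):
--     return sorted(attendees, key=lambda n: (n > priority) - (n < priority))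
-- ===== Notes on version B (the rewrite author's own statement) =====
-- stated objective: idiomatic
-- what changed: Replaced the three-accumulator single-pass partition with one stable sort keyed by the comparison sign (n>priority)-(n<priority), whose stability reproduces the less+equal+greater order.
import Mathlib
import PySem

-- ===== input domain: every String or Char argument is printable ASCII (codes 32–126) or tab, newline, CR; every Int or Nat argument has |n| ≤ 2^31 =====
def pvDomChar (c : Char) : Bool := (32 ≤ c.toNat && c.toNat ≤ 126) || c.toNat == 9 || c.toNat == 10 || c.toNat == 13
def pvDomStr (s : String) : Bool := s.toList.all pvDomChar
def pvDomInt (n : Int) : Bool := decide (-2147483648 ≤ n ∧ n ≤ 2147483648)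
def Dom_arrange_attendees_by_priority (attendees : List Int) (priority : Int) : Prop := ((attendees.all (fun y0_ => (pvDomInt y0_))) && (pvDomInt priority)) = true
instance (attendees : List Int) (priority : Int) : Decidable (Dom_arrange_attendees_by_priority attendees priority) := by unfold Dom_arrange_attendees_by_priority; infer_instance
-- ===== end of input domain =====

-- B replaces A's three-accumulator single-pass partition by one stable sort on the
-- comparison-sign key (n>priority)-(n<priority); same return value, more idiomatic.


-- ===== PORT A =====
def arrange_attendees_by_priority (attendees : List Int) (priority : Int) : List Int :=
  let less : List Int := []
  let greater : List Int := []
  let equal : List Int := []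
  let i : Int := 0
  let j : Int := (attendees.length : Int) - 1
  let _k : Int := PySem.Int.floordiv (i + j + 1) 2
  let (less, equal, greater) :=
    attendees.foldl (fun (acc : List Int × List Int × List Int) n =>
      let (less, equal, greater) := acc
      let less := if n < priority then less ++ [n] else less
      let equal := if n = priority then equal ++ [n] else equal
      let greater := if n > priority then greater ++ [n] else greater
      (less, equal, greater)) (less, equal, greater)
  less ++ equal ++ greater

-- ===== PORT B =====
-- key of Source B: (n > priority) - (n < priority), Python booleans as 0/1 ints
def pvSignKey (priority n : Int) : Int :=
  (if n > priority then (1 : Int) else 0) - (if n < priority then (1 : Int) else 0)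

def arrange_attendees_by_priority_alt (attendees : List Int) (priority : Int) : List Int :=
  PySem.List.sorted attendees (pvSignKey priority) false

-- ===== PRECONDITION & SPEC =====
def Spec_arrange_attendees_by_priority (attendees : List Int) (priority : Int) (out : List Int) : Prop := out = arrange_attendees_by_priority_alt attendees priority
instance (attendees : List Int) (priority : Int) (out : List Int) : Decidable (Spec_arrange_attendees_by_priority attendees priority out) := by unfold Spec_arrange_attendees_by_priority; infer_instance

-- ===== CLAIM (what is proved, stated in full; the proofs are below) =====
def Claim_equal_arrange_attendees_by_priority : Prop := ∀ (attendees : List Int) (priority : Int), Dom_arrange_attendees_by_priority attendees priority → Spec_arrange_attendees_by_priority attendees priority (arrange_attendees_by_priority attendees priority)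

-- ===== LEMMAS AND PROOFS =====

-- A's loop extends each accumulator by the corresponding filter of the remaining input.
theorem pvA_loop (priority : Int) (xs : List Int) (L E G : List Int) :
    xs.foldl (fun (acc : List Int × List Int × List Int) n =>
      let (less, equal, greater) := acc
      let less := if n < priority then less ++ [n] else less
      let equal := if n = priority then equal ++ [n] else equal
      let greater := if n > priority then greater ++ [n] else greater
      (less, equal, greater)) (L, E, G)
    = (L ++ xs.filter (fun n => decide (n < priority)),
       E ++ xs.filter (fun n => decide (n = priority)),
       G ++ xs.filter (fun n => decide (n > priority))) := by
  induction xs generalizing L E G with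
  | nil => simp
  | cons x t ih =>
      simp only [List.foldl_cons, List.filter_cons]
      rcases lt_trichotomy x priority with h | h | h
      · simp [ih, h, ne_of_lt h, not_lt_of_gt h]
      · simp [ih, h]
      · simp [ih, h, (ne_of_gt h), not_lt_of_gt h]

-- insertBy places x exactly between a prefix it does not go before and a suffix it goes before.
theorem pvInsertBy_split {α : Type} (before : α → α → Bool) (x : α) (as bs : List α)
    (h1 : ∀ y ∈ as, before x y = false) (h2 : ∀ y ∈ bs, before x y = true) :
    PySem.List.insertBy before x (as ++ bs) = as ++ x :: bs := by
  induction as with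
  | nil =>
      cases bs with
      | nil => simp [PySem.List.insertBy]
      | cons b bs' => simp [PySem.List.insertBy, h2 b (by simp)]
  | cons a as' ih =>
      have ha : before x a = false := h1 a (by simp)
      simp [PySem.List.insertBy, ha,
        ih (fun y hy => h1 y (by simp [hy])) ]

-- The stable insertion sort under the sign key produces less ++ equal ++ greater.
theorem pvSorted_eq (priority : Int) (xs : List Int) :
    PySem.List.sorted xs (pvSignKey priority) false
    = xs.filter (fun n => decide (n < priority))
      ++ xs.filter (fun n => decide (n = priority))
      ++ xs.filter (fun n => decide (n > priority)) := by
  rw [PySem.List.sorted_eq_foldl_insertBy]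
  induction xs using List.reverseRecOn with
  | nil => simp
  | append_singleton t x ih =>
      rw [List.foldl_append, List.foldl_cons, List.foldl_nil, ih]
      simp only [List.filter_append, List.filter_cons, List.filter_nil]
      rcases lt_trichotomy x priority with h | h | h
      · have hx : pvSignKey priority x = -1 := by
          simp [pvSignKey, h, not_lt_of_gt h]
        rw [List.append_assoc, pvInsertBy_split _ x (t.filter (fun n => decide (n < priority)))
            (t.filter (fun n => decide (n = priority)) ++ t.filter (fun n => decide (n > priority)))]
        · simp [h, ne_of_lt h, not_lt_of_gt h]
        · intro y hy
          have hy' : y < priority := by simpa using (List.of_mem_filter hy)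
          simp only [pvSignKey, decide_eq_false_iff_not, not_lt]
          split_ifs <;> omega
        · intro y hy
          rcases List.mem_append.mp hy with hy | hy
          · have hy' : y = priority := by simpa using (List.of_mem_filter hy)
            simp only [pvSignKey, decide_eq_true_eq]
            split_ifs <;> omega
          · have hy' : y > priority := by simpa using (List.of_mem_filter hy)
            simp only [pvSignKey, decide_eq_true_eq]
            split_ifs <;> omega
      · have hx : pvSignKey priority x = 0 := by simp [pvSignKey, h]
        rw [show t.filter (fun n => decide (n < priority))
              ++ t.filter (fun n => decide (n = priority))
              ++ t.filter (fun n => decide (n > priority))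
            = (t.filter (fun n => decide (n < priority)) ++ t.filter (fun n => decide (n = priority)))
              ++ t.filter (fun n => decide (n > priority)) by simp,
           pvInsertBy_split]
        · simp [h]
        · intro y hy
          rcases List.mem_append.mp hy with hy | hy
          · have hy' : y < priority := by simpa using (List.of_mem_filter hy)
            simp only [pvSignKey, decide_eq_false_iff_not, not_lt]
            split_ifs <;> omega
          · have hy' : y = priority := by simpa using (List.of_mem_filter hy)
            simp only [pvSignKey, decide_eq_false_iff_not, not_lt]
            split_ifs <;> omega
        · intro y hy
          have hy' : y > priority := by simpa using (List.of_mem_filter hy)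
          simp only [pvSignKey, decide_eq_true_eq]
          split_ifs <;> omega
      · have hx : pvSignKey priority x = 1 := by
          simp [pvSignKey, h, not_lt_of_gt h]
        rw [show t.filter (fun n => decide (n < priority))
              ++ t.filter (fun n => decide (n = priority))
              ++ t.filter (fun n => decide (n > priority))
            = (t.filter (fun n => decide (n < priority)) ++ t.filter (fun n => decide (n = priority))
               ++ t.filter (fun n => decide (n > priority))) ++ [] by simp,
           pvInsertBy_split]
        · simp [h, ne_of_gt h, not_lt_of_gt h]
        · intro y hy
          simp only [pvSignKey, decide_eq_false_iff_not, not_lt]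
          split_ifs <;> omega
        · intro y hy; simp at hy

-- ===== VERDICT (by name: the statement is the Claim_ definition above) =====
theorem arrange_attendees_by_priority_spec : Claim_equal_arrange_attendees_by_priority := by
  intro attendees priority _
  unfold Spec_arrange_attendees_by_priority arrange_attendees_by_priority_alt
  rw [pvSorted_eq]
  simp only [arrange_attendees_by_priority, pvA_loop]
  simp
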